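-- pv_equiv track=rewrite | github.com/shellydeforte/deconstruct_lc | deconstruct_lc/data_pdb/histag.py | slice_seq
-- ===== SOURCE A (Python) =====
-- def slice_seq(indexes, seq):
--     if len(indexes) > 0:
--         nseq = seq[:indexes[0]]
--         for i in range(1, len(indexes) - 1, 2):
--             nseq += seq[indexes[i]:indexes[i + 1]]
--         nseq += seq[indexes[-1]:]
--     else:
--         nseq = seq
--     return nseq
-- ===== SOURCE B (Python) =====
-- def slice_seq(indexes, seq):
--     if not indexes:
--         return seq
--     out = seq[:indexes[0]]
--     start = None
--     for x in indexes[1:]: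
--         if start is None:
--             start = x
--         else:
--             out += seq[start:x]
--             start = None
--     return out + seq[indexes[-1]:]
-- ===== Notes on version B (the rewrite author's own statement) =====
-- stated objective: alternative
-- what changed: Replaces A's stride-2 index arithmetic (range(1,len-1,2) with indexes[i]/indexes[i+1] lookups) by a single element-wise pass over the index list driven by a parity-toggle state machine: a pending region start is set by one index and flushed as a slice by the next index seen.
import Mathlib
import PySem

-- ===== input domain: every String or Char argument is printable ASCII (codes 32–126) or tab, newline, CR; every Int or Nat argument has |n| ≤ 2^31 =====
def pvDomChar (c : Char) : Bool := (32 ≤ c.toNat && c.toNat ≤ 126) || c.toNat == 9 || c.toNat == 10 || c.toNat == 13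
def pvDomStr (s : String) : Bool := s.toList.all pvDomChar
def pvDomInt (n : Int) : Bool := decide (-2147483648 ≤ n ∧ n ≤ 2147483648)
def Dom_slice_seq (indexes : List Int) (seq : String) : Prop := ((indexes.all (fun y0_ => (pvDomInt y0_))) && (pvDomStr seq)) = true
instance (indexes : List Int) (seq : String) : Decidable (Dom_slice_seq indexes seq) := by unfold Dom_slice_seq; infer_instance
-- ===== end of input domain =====

-- B replaces A's stride-2 index arithmetic and repeated string += by one element-wise pass
-- over the index list driven by a parity-toggle (pending region start) state machine;
-- objective: alternative.

-- ===== PORT A =====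
def slice_seq (indexes : List Int) (seq : String) : String :=
  if indexes.length > 0 then
    let nseq := PySem.Str.slice seq none (some (PySem.List.pyGetD indexes 0 0))
    let nseq := (PySem.List.pyRange 1 ((indexes.length : Int) - 1) 2).foldl
      (fun acc i =>
        acc ++ PySem.Str.slice seq (some (PySem.List.pyGetD indexes i 0))
          (some (PySem.List.pyGetD indexes (i + 1) 0))) nseq
    nseq ++ PySem.Str.slice seq (some (PySem.List.pyGetD indexes (-1) 0)) none
  else
    seq

-- ===== PORT B =====
def slice_seq_alt (indexes : List Int) (seq : String) : String :=
  if indexes.isEmpty then seq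
  else
    let st := (PySem.List.slice indexes (some 1) none).foldl
      (fun (st : String × Option Int) x =>
        match st.2 with
        | none => (st.1, some x)
        | some a => (st.1 ++ PySem.Str.slice seq (some a) (some x), none))
      (PySem.Str.slice seq none (some (PySem.List.pyGetD indexes 0 0)), none)
    st.1 ++ PySem.Str.slice seq (some (PySem.List.pyGetD indexes (-1) 0)) none

-- ===== PRECONDITION & SPEC =====
def Spec_slice_seq (indexes : List Int) (seq : String) (out : String) : Prop := out = slice_seq_alt indexes seq
instance (indexes : List Int) (seq : String) (out : String) : Decidable (Spec_slice_seq indexes seq out) := by unfold Spec_slice_seq; infer_instance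

-- ===== CLAIM (what is proved, stated in full; the proofs are below) =====
def Claim_equal_slice_seq : Prop := ∀ (indexes : List Int) (seq : String), Dom_slice_seq indexes seq → Spec_slice_seq indexes seq (slice_seq indexes seq)

-- ===== LEMMAS AND PROOFS =====

-- the consecutive non-overlapping pairs of a list, dropping a lone leftover element
def togglePairs : List Int → List (Int × Int)
  | a :: b :: rest => (a, b) :: togglePairs rest
  | _ => []

-- B's toggle fold: starting with no pending start, the string accumulated is exactly
-- the slices at the consecutive pairs (a lone trailing index leaves only a pending start)
theorem toggle_fold_acc (seq : String) : ∀ (r : List Int) (s0 : String),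
    (r.foldl
      (fun (st : String × Option Int) x =>
        match st.2 with
        | none => (st.1, some x)
        | some a => (st.1 ++ PySem.Str.slice seq (some a) (some x), none))
      (s0, none)).1
    = (togglePairs r).foldl
        (fun a p => a ++ PySem.Str.slice seq (some p.1) (some p.2)) s0
  | [], s0 => by simp [togglePairs]
  | [a], s0 => by simp [togglePairs]
  | a :: b :: rest, s0 => by
    have ih := toggle_fold_acc seq rest (s0 ++ PySem.Str.slice seq (some a) (some b))
    simp only [List.foldl_cons] at ih ⊢
    simp only [togglePairs, List.foldl_cons]
    exact ih

-- togglePairs r as a map over the even positions of r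
theorem togglePairs_eq_range_map : ∀ (r : List Int),
    togglePairs r = (List.range (r.length / 2)).map (fun k => (r.getD (2*k) 0, r.getD (2*k+1) 0))
  | [] => by simp [togglePairs]
  | [a] => by simp [togglePairs]
  | a :: b :: rest => by
    have ih := togglePairs_eq_range_map rest
    simp only [togglePairs, ih, List.length_cons]
    have hl : (rest.length + 1 + 1) / 2 = rest.length / 2 + 1 := by omega
    rw [hl, List.range_succ_eq_map]
    simp [List.map_map, Function.comp_def, Nat.mul_succ, Nat.succ_eq_add_one]

-- a foldl of appends over strings, seen through toList
theorem foldl_append_toList {β : Type} : ∀ (l : List β) (init : String) (f : β → String),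
    (l.foldl (fun a x => a ++ f x) init).toList = init.toList ++ (l.map (fun x => (f x).toList)).flatten
  | [], _, _ => by simp
  | x :: l, init, f => by
    simp [List.foldl_cons, foldl_append_toList l (init ++ f x) f, String.toList_append]

theorem getD_shift (i0 : Int) (r : List Int) (k : Nat) :
    PySem.List.pyGetD (i0 :: r) (1 + 2*(k:Int)) 0 = r.getD (2*k) 0 := by
  have h : (1 + 2*(k:Int)) = ((2*k+1 : Nat) : Int) := by push_cast; ring
  rw [h, PySem.List.pyGetD_natCast, List.getD_cons_succ]

theorem getD_shift' (i0 : Int) (r : List Int) (k : Nat) :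
    PySem.List.pyGetD (i0 :: r) (1 + 2*(k:Int) + 1) 0 = r.getD (2*k+1) 0 := by
  have h : (1 + 2*(k:Int) + 1) = ((2*k+1+1 : Nat) : Int) := by push_cast; ring
  rw [h, PySem.List.pyGetD_natCast, List.getD_cons_succ]

-- ===== VERDICT (by name: the statement is the Claim_ definition above) =====
theorem slice_seq_spec : Claim_equal_slice_seq := by
  intro indexes seq _
  unfold Spec_slice_seq slice_seq slice_seq_alt
  match indexes with
  | [] => simp
  | i0 :: r =>
    simp only [List.length_cons, List.isEmpty_cons, gt_iff_lt,
      Nat.zero_lt_succ, if_pos, Bool.false_eq_true, if_neg, not_false_eq_true]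
    rw [PySem.List.slice_from_one]
    have hb : ((↑(r.length + 1) : Int) - 1) = (r.length : Int) := by push_cast; ring
    rw [hb, PySem.List.pyRange_of_pos 1 (r.length : Int) (by norm_num : (0:Int) < 2)]
    have hc : (if (1:Int) < (r.length : Int) then (((r.length:Int) - 1 + 2 - 1)/2).toNat else 0)
        = r.length / 2 := by split_ifs with h <;> omega
    rw [hc, List.foldl_map, List.tail_cons, toggle_fold_acc]
    apply String.toList_inj.mp
    rw [String.toList_append, String.toList_append, foldl_append_toList, foldl_append_toList]
    simp [togglePairs_eq_range_map, List.map_map, Function.comp_def, getD_shift, getD_shift']
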